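-- pv_equiv track=rewrite | github.com/Shivakumarr18/DE-Interview-Prep | python/Python_Practice.py | intersect_ordered
-- ===== SOURCE A (Python) =====
-- def intersect_ordered(list1, list2):
--     set2 = set(list2) # Using a set for O(1) lookup speed
--     result = []
--     seen_in_result = set()
--
--     for item in list1:
--         if item in set2 and item not in seen_in_result:
--             result.append(item)
--             seen_in_result.add(item)
--     return result
-- ===== SOURCE B (Python) =====
-- def intersect_ordered(list1, list2):
--     # Index-based reconstruction: map each value of list1 to its first index,
--     # filter that map by membership in list2, then rebuild the output by
--     # sorting the surviving (first_index, value) pairs on the index.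
--     first = {}
--     for i, x in enumerate(list1):
--         first.setdefault(x, i)
--     set2 = set(list2)
--     pairs = [(i, x) for x, i in first.items() if x in set2]
--     pairs.sort(key=lambda p: p[0])
--     return [x for _, x in pairs]
-- ===== Notes on version B (the rewrite author's own statement) =====
-- stated objective: alternative
-- what changed: Instead of a single filtered pass with a manually maintained seen-set, B builds a first-occurrence index map of list1, filters its entries by membership in set(list2), and reconstructs the output by sorting the surviving (first_index, value) pairs on the index.
import Mathlib
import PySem

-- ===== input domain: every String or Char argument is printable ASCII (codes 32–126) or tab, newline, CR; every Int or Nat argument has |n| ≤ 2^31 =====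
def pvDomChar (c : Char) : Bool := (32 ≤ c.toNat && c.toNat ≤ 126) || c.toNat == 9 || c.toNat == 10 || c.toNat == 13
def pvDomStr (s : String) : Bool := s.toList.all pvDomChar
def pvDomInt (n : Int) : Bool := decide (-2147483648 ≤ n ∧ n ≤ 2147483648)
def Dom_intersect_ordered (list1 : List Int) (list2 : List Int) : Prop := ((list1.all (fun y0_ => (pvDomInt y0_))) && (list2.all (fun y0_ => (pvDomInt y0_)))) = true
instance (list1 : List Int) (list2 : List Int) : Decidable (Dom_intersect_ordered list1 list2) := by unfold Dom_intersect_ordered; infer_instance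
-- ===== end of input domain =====

-- B replaces A's filtered single pass with a seen-set by a first-occurrence index
-- map filtered against set(list2) and an index-sorted reconstruction (alternative
-- decomposition, same results).

-- ===== PORT A =====
def intersect_ordered (list1 : List Int) (list2 : List Int) : List Int :=
  let set2 := PySem.Set.ofList list2
  let st := list1.foldl
    (fun (st : List Int × PySem.Set Int) item =>
      if PySem.Set.contains set2 item && !(PySem.Set.contains st.2 item) then
        (st.1 ++ [item], PySem.Set.add st.2 item)
      else st)
    ([], PySem.Set.empty)
  st.1

-- ===== PORT B =====
def intersect_ordered_alt (list1 : List Int) (list2 : List Int) : List Int :=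
  let first : PySem.Dict Int Int :=
    (PySem.List.enumerate list1 0).foldl (fun d p => d.setdefault p.2 p.1) PySem.Dict.empty
  let set2 := PySem.Set.ofList list2
  let pairs := (first.items.filter (fun q => PySem.Set.contains set2 q.1)).map
    (fun q => (q.2, q.1))
  (PySem.List.sorted pairs (fun p => p.1) false).map (fun p => p.2)

-- ===== PRECONDITION & SPEC =====
def Spec_intersect_ordered (list1 : List Int) (list2 : List Int) (out : List Int) : Prop := out = intersect_ordered_alt list1 list2
instance (list1 : List Int) (list2 : List Int) (out : List Int) : Decidable (Spec_intersect_ordered list1 list2 out) := by unfold Spec_intersect_ordered; infer_instance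

-- ===== CLAIM =====
def Claim_equal_intersect_ordered : Prop := ∀ (list1 : List Int) (list2 : List Int), Dom_intersect_ordered list1 list2 → Spec_intersect_ordered list1 list2 (intersect_ordered list1 list2)

-- ===== LEMMAS AND PROOFS =====

-- A's loop, with the invariant that 'seen' holds exactly the elements of 'res',
-- computes the same list as folding Set.add over the filtered stream.
theorem intersect_loop_eq (set2 : PySem.Set Int) (l1 : List Int) :
    ∀ (res seen : List Int), (∀ x : Int, x ∈ seen ↔ x ∈ res) →
    (l1.foldl
      (fun (st : List Int × PySem.Set Int) item =>
        if PySem.Set.contains set2 item && !(PySem.Set.contains st.2 item) then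
          (st.1 ++ [item], PySem.Set.add st.2 item)
        else st)
      (res, seen)).1
    = (l1.filter (fun item => PySem.Set.contains set2 item)).foldl PySem.Set.add res := by
  induction l1 with
  | nil => intro res seen _; simp
  | cons a l ih =>
    intro res seen hinv
    by_cases h2 : PySem.Set.contains set2 a
    · by_cases hs : a ∈ seen
      · have hres : a ∈ res := (hinv a).1 hs
        have hcs : PySem.Set.contains seen a = true := by
          simpa [PySem.Set.contains] using hs
        simp only [List.foldl_cons, List.filter_cons, h2, hcs, Bool.not_true,
          Bool.and_false]
        rw [if_neg (by simp)]
        simp only [if_true]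
        rw [ih res seen hinv]
        simp [PySem.Set.add, PySem.Set.contains, hres]
      · have hres : a ∉ res := fun h => hs ((hinv a).2 h)
        have hcs : PySem.Set.contains seen a = false := by
          simp [PySem.Set.contains, hs]
        simp only [List.foldl_cons, List.filter_cons, h2, hcs, Bool.not_false,
          Bool.and_true]
        simp only [if_true]
        rw [ih (res ++ [a]) (PySem.Set.add seen a) ?_]
        · simp [PySem.Set.add, PySem.Set.contains, hres]
        · intro x
          simp [PySem.Set.mem_add, hinv x]
    · have h2' : PySem.Set.contains set2 a = false := by simpa using h2
      simp only [List.foldl_cons, List.filter_cons, h2', Bool.false_and]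
      rw [if_neg (by simp), if_neg (by simp)]
      exact ih res seen hinv

-- Reference form of B's first-occurrence dict: the (value, first index) pairs of xs
-- (indices starting at s) whose value is not already in 'seen'.
def collect (xs : List Int) (s : Int) (seen : List Int) : List (Int × Int) :=
  match xs with
  | [] => []
  | x :: t => if x ∈ seen then collect t (s + 1) seen else (x, s) :: collect t (s + 1) (seen ++ [x])

theorem collect_cons (x : Int) (t : List Int) (s : Int) (seen : List Int) :
    collect (x :: t) s seen
      = if x ∈ seen then collect t (s + 1) seen
        else (x, s) :: collect t (s + 1) (seen ++ [x]) := rfl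

theorem collect_cons_mem {x : Int} {seen : List Int} (t : List Int) (s : Int)
    (h : x ∈ seen) : collect (x :: t) s seen = collect t (s + 1) seen := by
  rw [collect_cons, if_pos h]

theorem collect_cons_not_mem {x : Int} {seen : List Int} (t : List Int) (s : Int)
    (h : x ∉ seen) : collect (x :: t) s seen = (x, s) :: collect t (s + 1) (seen ++ [x]) := by
  rw [collect_cons, if_neg h]

theorem fold_items (xs : List Int) : ∀ (s : Int) (d : PySem.Dict Int Int),
    ((PySem.List.enumerate xs s).foldl (fun d p => d.setdefault p.2 p.1) d).items
      = d.items ++ collect xs s d.keys := by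
  induction xs with
  | nil => intro s d; simp [collect, PySem.List.enumerate_nil]
  | cons x t ih =>
    intro s d
    simp only [PySem.List.enumerate_cons, List.foldl_cons]
    by_cases hx : x ∈ d.keys
    · have hc : d.contains x = true := (PySem.Dict.contains_iff_mem_keys d x).mpr hx
      rw [PySem.Dict.setdefault_of_contains d s hc, ih, collect_cons_mem t s hx]
    · have hc : d.contains x = false := by
        cases h : d.contains x
        · rfl
        · exact absurd ((PySem.Dict.contains_iff_mem_keys d x).mp h) hx
      rw [PySem.Dict.setdefault_of_not_contains d s hc, ih,
        PySem.Dict.items_insert_of_not_contains d s hc,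
        PySem.Dict.keys_insert_of_not_contains d s hc,
        collect_cons_not_mem t s hx]
      simp

theorem collect_snd_ge (xs : List Int) : ∀ (s : Int) (seen : List Int),
    ∀ q ∈ collect xs s seen, s ≤ q.2 := by
  induction xs with
  | nil => intro s seen q hq; simp [collect] at hq
  | cons x t ih =>
    intro s seen q hq
    by_cases hx : x ∈ seen
    · rw [collect_cons_mem t s hx] at hq
      have := ih (s + 1) seen q hq; omega
    · rw [collect_cons_not_mem t s hx] at hq
      rcases List.mem_cons.mp hq with hq | hq
      · simp [hq]
      · have := ih (s + 1) (seen ++ [x]) q hq; omega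

theorem collect_pairwise (xs : List Int) : ∀ (s : Int) (seen : List Int),
    (collect xs s seen).Pairwise (fun a b => a.2 < b.2) := by
  induction xs with
  | nil => intro s seen; simp [collect]
  | cons x t ih =>
    intro s seen
    by_cases hx : x ∈ seen
    · rw [collect_cons_mem t s hx]
      exact ih (s + 1) seen
    · rw [collect_cons_not_mem t s hx]
      refine List.Pairwise.cons ?_ (ih (s + 1) (seen ++ [x]))
      intro q hq
      have := collect_snd_ge t (s + 1) (seen ++ [x]) q hq
      simp only
      omega

-- The filtered first occurrences of xs beyond 'seen', prefixed by what has been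
-- accepted so far, are exactly A's Set.add fold over the filtered stream.
theorem collect_filter_fst (p : Int → Bool) (xs : List Int) :
    ∀ (s : Int) (seen res : List Int), (∀ y : Int, p y → (y ∈ seen ↔ y ∈ res)) →
    res ++ ((collect xs s seen).filter (fun q => p q.1)).map Prod.fst
      = (xs.filter p).foldl PySem.Set.add res := by
  induction xs with
  | nil => intro s seen res _; simp [collect]
  | cons x t ih =>
    intro s seen res hinv
    by_cases hx : x ∈ seen
    · rw [collect_cons_mem t s hx]
      by_cases hp : p x
      · have hres : x ∈ res := (hinv x hp).1 hx
        simp only [List.filter_cons]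
        rw [if_pos hp, List.foldl_cons, PySem.Set.add_of_mem hres]
        exact ih (s + 1) seen res hinv
      · simp only [List.filter_cons]
        rw [if_neg hp]
        exact ih (s + 1) seen res hinv
    · rw [collect_cons_not_mem t s hx]
      by_cases hp : p x
      · have hres : x ∉ res := fun h => hx ((hinv x hp).2 h)
        simp only [List.filter_cons]
        rw [if_pos hp, if_pos hp, List.map_cons, List.foldl_cons,
          PySem.Set.add_of_not_mem hres]
        have hinv' : ∀ y : Int, p y → (y ∈ seen ++ [x] ↔ y ∈ res ++ [x]) := by
          intro y hy; simp [hinv y hy]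
        have := ih (s + 1) (seen ++ [x]) (res ++ [x]) hinv'
        simpa [List.append_assoc] using this
      · simp only [List.filter_cons]
        rw [if_neg hp, if_neg hp]
        have hinv' : ∀ y : Int, p y → (y ∈ seen ++ [x] ↔ y ∈ res) := by
          intro y hy
          have hne : y ≠ x := fun h => hp (h ▸ hy)
          simp [hinv y hy, hne]
        exact ih (s + 1) (seen ++ [x]) res hinv'

-- ===== VERDICT =====
theorem intersect_ordered_spec : Claim_equal_intersect_ordered := by
  intro list1 list2 _
  unfold Spec_intersect_ordered intersect_ordered intersect_ordered_alt
  simp only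
  set p : Int → Bool := fun item => PySem.Set.contains (PySem.Set.ofList list2) item with hp
  -- A's side: the loop is Set.add folded over the filtered stream
  rw [intersect_loop_eq (PySem.Set.ofList list2) list1 [] PySem.Set.empty
    (by simp [PySem.Set.empty])]
  -- B's side: the dict's items are 'collect', the sort is the identity
  have hitems : ((PySem.List.enumerate list1 0).foldl
      (fun d p => d.setdefault p.2 p.1) PySem.Dict.empty).items = collect list1 0 [] := by
    simpa [PySem.Dict.empty] using fold_items list1 0 PySem.Dict.empty
  rw [hitems]
  set pairs := ((collect list1 0 []).filter (fun q => p q.1)).map (fun q => (q.2, q.1))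
    with hpairs
  have hpw : pairs.Pairwise (fun a b => a.1 ≤ b.1) := by
    rw [hpairs]
    refine List.Pairwise.map _ ?_ (List.Pairwise.filter _ (collect_pairwise list1 0 []))
    intro a b h
    exact le_of_lt h
  rw [PySem.List.sorted_eq_self_of_pairwise pairs (fun p => p.1) hpw]
  rw [hpairs, List.map_map]
  have : ((fun p : Int × Int => p.2) ∘ fun q : Int × Int => (q.2, q.1)) = Prod.fst := rfl
  rw [this]
  exact (collect_filter_fst p list1 0 [] [] (by simp)).symm
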